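-- pv_equiv track=rewrite | github.com/techeer-sv/Surviving-the-Code | kihong/week5/BOJ31575.py | solve
-- ===== SOURCE A (Python) =====
-- def solve(board, n, m):
--     def dfs(x, y, board):
--         dx = [0, 1]
--         dy = [1, 0]
--
--         visited = [[False] * n for _ in range(m)]
--         stack = [(x, y)]
--         visited[y][x] = True
--         while stack:
--             cx, cy = stack.pop()
--             if cx == n - 1 and cy == m - 1:
--                 return True
--             for i in range(2):
--                 nx = cx + dx[i]
--                 ny = cy + dy[i]
--                 if 0 <= nx < n and 0 <= ny < m:
--                     if not visited[ny][nx] and board[ny][nx] == 1: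
--                         visited[ny][nx] = True
--                         stack.append((nx, ny))
--         return False
--
--     return "Yes" if dfs(0, 0, board) else "No"
-- ===== SOURCE B (Python) =====
-- def solve(board, n, m):
--     def cell(i, j):
--         row = board[i] if i < len(board) else []
--         return row[j] if j < len(row) else 0
--
--     reachable = [[False] * n for _ in range(m)]
--     for i in range(m):
--         for j in range(n):
--             if i == 0 and j == 0:
--                 reachable[i][j] = True
--             elif cell(i, j) == 1:
--                 up = reachable[i - 1][j] if i > 0 else False
--                 left = reachable[i][j - 1] if j > 0 else False
--                 reachable[i][j] = up or left
--     return "Yes" if reachable[m - 1][n - 1] else "No"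
-- ===== Notes on version B (the rewrite author's own statement) =====
-- stated objective: alternative
-- what changed: Replaces the stack-based DFS with visited matrix by a single row-major dynamic-programming sweep filling a reachability table (reachable[i][j] = cell==1 and (up or left), seed reachable[0][0]=True), with a bounds-checked cell read that treats a missing board entry as blocked.
-- outside the precondition, e.g. on solve([[9, 1, 0], [0, 0]], 3, 2): A returns 'No', B returns 'No'
import Mathlib
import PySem

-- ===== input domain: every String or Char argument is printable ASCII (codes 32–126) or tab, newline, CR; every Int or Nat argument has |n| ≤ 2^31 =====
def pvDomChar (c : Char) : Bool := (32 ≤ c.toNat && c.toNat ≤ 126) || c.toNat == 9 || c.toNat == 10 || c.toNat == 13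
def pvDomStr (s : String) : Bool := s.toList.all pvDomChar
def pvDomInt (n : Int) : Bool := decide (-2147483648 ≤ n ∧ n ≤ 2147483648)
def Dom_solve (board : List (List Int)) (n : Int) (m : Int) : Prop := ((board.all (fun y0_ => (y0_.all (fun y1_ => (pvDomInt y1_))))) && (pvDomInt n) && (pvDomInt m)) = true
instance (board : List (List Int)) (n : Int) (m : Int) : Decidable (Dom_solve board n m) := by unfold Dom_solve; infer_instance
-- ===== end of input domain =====

-- B replaces A's stack DFS by a row-major DP sweep over the grid (alternative algorithm, same cost).

-- ===== PORT A =====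
-- board[y][x]: only evaluated at indices 0 ≤ y < m, 0 ≤ x < n (guarded in the loop), where it
-- equals Python's board[ny][nx] under Pre_solve.
def cellA (board : List (List Int)) (y x : Int) : Int :=
  (board.getD y.toNat []).getD x.toNat 0

-- visited[y][x] = True  (the m×n boolean matrix, represented as a function; written in bounds only)
def updA (v : Int → Int → Bool) (y x : Int) : Int → Int → Bool :=
  fun y' x' => if y' = y ∧ x' = x then true else v y' x'

-- the body of `for i in range(2)` for one neighbour (nx, ny): mark and push if eligible
def stepA (board : List (List Int)) (n m : Int)
    (st : (Int → Int → Bool) × List (Int × Int)) (nx ny : Int) :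
    (Int → Int → Bool) × List (Int × Int) :=
  if 0 ≤ nx ∧ nx < n ∧ 0 ≤ ny ∧ ny < m ∧ st.1 ny nx = false ∧ cellA board ny nx = 1 then
    (updA st.1 ny nx, (nx, ny) :: st.2)
  else st

-- the `while stack:` loop; the list head is the top of Python's stack (append/pop at the end).
-- `fuel` only makes the loop total: n.toNat * m.toNat iterations always suffice (proved below).
def loopA (board : List (List Int)) (n m : Int) :
    Nat → (Int → Int → Bool) → List (Int × Int) → Bool
  | 0, _, _ => false
  | _ + 1, _, [] => false
  | fuel + 1, v, (cx, cy) :: rest =>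
    if cx = n - 1 ∧ cy = m - 1 then true
    else
      let st1 := stepA board n m (v, rest) cx (cy + 1)   -- i = 0 : dx = 0, dy = 1
      let st2 := stepA board n m st1 (cx + 1) cy         -- i = 1 : dx = 1, dy = 0
      loopA board n m fuel st2.1 st2.2

def solve (board : List (List Int)) (n : Int) (m : Int) : String :=
  if loopA board n m (n.toNat * m.toNat) (updA (fun _ _ => false) 0 0) [(0, 0)]
  then "Yes" else "No"

-- ===== PORT B =====
def cellB (board : List (List Int)) (i j : Nat) : Int :=
  (board.getD i []).getD j 0

-- reachable[i][j] (the m×n boolean table, a list of rows like Source B's `reachable`)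
def getT (t : List (List Bool)) (i j : Nat) : Bool :=
  (t.getD i []).getD j false

-- reachable[i][j] = v
def setT (t : List (List Bool)) (i j : Nat) (v : Bool) : List (List Bool) :=
  t.set i ((t.getD i []).set j v)

-- the body of B's inner loop for cell (i, j)
def stepB (board : List (List Int)) (t : List (List Bool)) (i j : Nat) : List (List Bool) :=
  if i = 0 ∧ j = 0 then setT t 0 0 true
  else if cellB board i j = 1 then
    setT t i j
      ((if 0 < i then getT t (i - 1) j else false) || (if 0 < j then getT t i (j - 1) else false))
  else t

def tableB (board : List (List Int)) (n m : Int) : List (List Bool) :=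
  (List.range m.toNat).foldl
    (fun t i => (List.range n.toNat).foldl (fun t j => stepB board t i j) t)
    (List.replicate m.toNat (List.replicate n.toNat false))

def solve_alt (board : List (List Int)) (n : Int) (m : Int) : String :=
  if getT (tableB board n m) (m.toNat - 1) (n.toNat - 1) then "Yes" else "No"

-- ===== PRECONDITION & SPEC =====
-- Pre_solve excludes n < 1 or m < 1 (A raises IndexError building the m×n visited matrix) and,
-- on boards that do not physically contain the full m×n grid, keeps only the cases where A
-- certainly returns without probing a missing entry (the 1×1 grid, or both first probes of the
-- DFS present and ≠ 1): on the remaining ragged boards whether A returns or raises depends on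
-- how far its search gets, and A's occasional returns there are excluded.
def Pre_solve (board : List (List Int)) (n : Int) (m : Int) : Prop :=
  1 ≤ n ∧ 1 ≤ m ∧
    ((n = 1 ∧ m = 1) ∨
     (m ≤ (board.length : Int) ∧ ∀ row ∈ board.take m.toNat, n ≤ (row.length : Int)) ∨
     ((m = 1 ∨ (2 ≤ board.length ∧ 1 ≤ (board.getD 1 []).length ∧ (board.getD 1 []).getD 0 0 ≠ 1)) ∧
      (n = 1 ∨ (1 ≤ board.length ∧ 2 ≤ (board.getD 0 []).length ∧ (board.getD 0 []).getD 1 0 ≠ 1))))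
instance (board : List (List Int)) (n : Int) (m : Int) : Decidable (Pre_solve board n m) := by
  unfold Pre_solve; infer_instance

def pvWitness_solve : List (List Int) × Int × Int := ([[1, 1], [0, 1]], 2, 2)

def Spec_solve (board : List (List Int)) (n : Int) (m : Int) (out : String) : Prop := out = solve_alt board n m
instance (board : List (List Int)) (n : Int) (m : Int) (out : String) : Decidable (Spec_solve board n m out) := by unfold Spec_solve; infer_instance

-- ===== CLAIM (what is proved, stated in full; the proofs are below) =====
def Claim_equal_solve : Prop := ∀ (board : List (List Int)) (n : Int) (m : Int), Dom_solve board n m → Pre_solve board n m → Spec_solve board n m (solve board n m)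

-- ===== LEMMAS AND PROOFS =====

-- Reachability from (0,0) by down/right moves onto 1-cells, the common specification of both ports.
-- Coordinates: y = row, x = column.
inductive ReachI (board : List (List Int)) (n m : Int) : Int → Int → Prop
  | start : ReachI board n m 0 0
  | down {y x : Int} : ReachI board n m y x → y + 1 < m → cellA board (y + 1) x = 1 →
      ReachI board n m (y + 1) x
  | right {y x : Int} : ReachI board n m y x → x + 1 < n → cellA board y (x + 1) = 1 →
      ReachI board n m y (x + 1)

theorem reach_bounds {board n m y x} (hn : 1 ≤ n) (hm : 1 ≤ m)
    (h : ReachI board n m y x) : 0 ≤ y ∧ y < m ∧ 0 ≤ x ∧ x < n := by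
  induction h with
  | start => omega
  | down _ h2 _ ih => omega
  | right _ h2 _ ih => omega

-- ---------- A side ----------

def closedAt (board : List (List Int)) (n m : Int) (v : Int → Int → Bool) (y x : Int) : Prop :=
  (y + 1 < m → cellA board (y + 1) x = 1 → v (y + 1) x = true) ∧
  (x + 1 < n → cellA board y (x + 1) = 1 → v y (x + 1) = true)

def InvA (board : List (List Int)) (n m : Int) (v : Int → Int → Bool)
    (s : List (Int × Int)) : Prop :=
  (∀ y x, v y x = true → ReachI board n m y x) ∧
  (∀ p ∈ s, v p.2 p.1 = true) ∧
  (∀ y x, v y x = true → ((x, y) ∈ s ∨ closedAt board n m v y x)) ∧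
  (v 0 0 = true) ∧
  (v (m - 1) (n - 1) = true → (n - 1, m - 1) ∈ s)

noncomputable def unv (n m : Int) (v : Int → Int → Bool) : Nat :=
  ((Finset.Ico (0 : Int) m ×ˢ Finset.Ico (0 : Int) n).filter (fun p => v p.1 p.2 = false)).card

theorem updA_mono {v : Int → Int → Bool} {y x y' x' : Int} (h : v y' x' = true) :
    updA v y x y' x' = true := by
  simp only [updA]; split <;> simp [h]

theorem unv_upd {n m : Int} {v : Int → Int → Bool} {y x : Int}
    (hy : 0 ≤ y) (hy2 : y < m) (hx : 0 ≤ x) (hx2 : x < n) (hv : v y x = false) :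
    unv n m (updA v y x) < unv n m v := by
  apply Finset.card_lt_card
  constructor
  · intro p hp
    simp only [Finset.mem_filter] at hp ⊢
    refine ⟨hp.1, ?_⟩
    have := hp.2
    simp only [updA] at this
    split at this
    · exact absurd this (by simp)
    · exact this
  · intro hsub
    have hmem : (y, x) ∈ (Finset.Ico (0 : Int) m ×ˢ Finset.Ico (0 : Int) n).filter
        (fun p => v p.1 p.2 = false) := by
      simp [Finset.mem_filter, Finset.mem_product, Finset.mem_Ico, hy, hy2, hx, hx2, hv]
    have := hsub hmem
    simp only [Finset.mem_filter, updA] at this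
    simp at this

-- completeness at an empty stack: every reachable cell is visited
theorem complete_of_empty {board n m v} (hInv : InvA board n m v []) :
    ∀ y x, ReachI board n m y x → v y x = true := by
  intro y x h
  induction h with
  | start => exact hInv.2.2.2.1
  | down h1 h2 h3 ih =>
      rcases hInv.2.2.1 _ _ ih with hmem | hcl
      · simp at hmem
      · exact hcl.1 h2 h3
  | right h1 h2 h3 ih =>
      rcases hInv.2.2.1 _ _ ih with hmem | hcl
      · simp at hmem
      · exact hcl.2 h2 h3

theorem stepA_cases (board : List (List Int)) (n m : Int)
    (st : (Int → Int → Bool) × List (Int × Int)) (nx ny : Int) :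
    (¬(0 ≤ nx ∧ nx < n ∧ 0 ≤ ny ∧ ny < m ∧ st.1 ny nx = false ∧ cellA board ny nx = 1) ∧
      stepA board n m st nx ny = st) ∨
    ((0 ≤ nx ∧ nx < n ∧ 0 ≤ ny ∧ ny < m ∧ st.1 ny nx = false ∧ cellA board ny nx = 1) ∧
      stepA board n m st nx ny = (updA st.1 ny nx, (nx, ny) :: st.2)) := by
  unfold stepA; split
  · next h => exact Or.inr ⟨h, rfl⟩
  · next h => exact Or.inl ⟨h, rfl⟩

theorem stepA_mono {board : List (List Int)} {n m : Int}
    {st : (Int → Int → Bool) × List (Int × Int)} {nx ny y x : Int}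
    (h : st.1 y x = true) : (stepA board n m st nx ny).1 y x = true := by
  rcases stepA_cases board n m st nx ny with ⟨-, he⟩ | ⟨-, he⟩ <;> rw [he]
  · exact h
  · exact updA_mono h

theorem stepA_measure {board : List (List Int)} {n m : Int}
    (st : (Int → Int → Bool) × List (Int × Int)) (nx ny : Int) :
    (stepA board n m st nx ny).2.length + unv n m (stepA board n m st nx ny).1 ≤
      st.2.length + unv n m st.1 := by
  rcases stepA_cases board n m st nx ny with ⟨-, he⟩ | ⟨⟨h1, h2, h3, h4, h5, h6⟩, he⟩ <;> rw [he]
  have := unv_upd h3 h4 h1 h2 h5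
  simp only [List.length_cons]
  omega

-- invariant between the pop of (cx, cy) and the recursive call
def MidInv (board : List (List Int)) (n m : Int) (cx cy : Int)
    (v : Int → Int → Bool) (s : List (Int × Int)) : Prop :=
  (∀ y x, v y x = true → ReachI board n m y x) ∧
  (∀ p ∈ s, v p.2 p.1 = true) ∧
  (∀ y x, v y x = true → ((x, y) ∈ s ∨ (x, y) = (cx, cy) ∨ closedAt board n m v y x)) ∧
  v 0 0 = true ∧
  (v (m - 1) (n - 1) = true → (n - 1, m - 1) ∈ s)

theorem closedAt_mono {board : List (List Int)} {n m : Int} {v v' : Int → Int → Bool}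
    (hmono : ∀ y x, v y x = true → v' y x = true) {y x : Int}
    (h : closedAt board n m v y x) : closedAt board n m v' y x :=
  ⟨fun h1 h2 => hmono _ _ (h.1 h1 h2), fun h1 h2 => hmono _ _ (h.2 h1 h2)⟩

theorem stepA_mid {board : List (List Int)} {n m : Int} (hn : 1 ≤ n) (hm : 1 ≤ m)
    {cx cy nx ny : Int} {v : Int → Int → Bool} {s : List (Int × Int)}
    (hpop : ReachI board n m cy cx)
    (hsucc : (nx = cx ∧ ny = cy + 1) ∨ (nx = cx + 1 ∧ ny = cy))
    (hgoal : ¬(cx = n - 1 ∧ cy = m - 1))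
    (hMid : MidInv board n m cx cy v s) :
    MidInv board n m cx cy (stepA board n m (v, s) nx ny).1 (stepA board n m (v, s) nx ny).2 ∧
    (nx < n → ny < m → cellA board ny nx = 1 → (stepA board n m (v, s) nx ny).1 ny nx = true) := by
  obtain ⟨hsound, hstack, hclose, hv00, hgs⟩ := hMid
  have hb := reach_bounds hn hm hpop
  have hnx0 : 0 ≤ nx := by omega
  have hny0 : 0 ≤ ny := by omega
  rcases stepA_cases board n m (v, s) nx ny with ⟨hg, he⟩ | ⟨⟨-, h2, -, h4, -, h6⟩, he⟩ <;> rw [he]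
  · refine ⟨⟨hsound, hstack, hclose, hv00, hgs⟩, ?_⟩
    intro hxn hym hc
    by_cases hv : v ny nx = true
    · exact hv
    · exact absurd ⟨hnx0, hxn, hny0, hym, by simpa using hv, hc⟩ hg
  · have hreach : ReachI board n m ny nx := by
      rcases hsucc with ⟨rfl, rfl⟩ | ⟨rfl, rfl⟩
      · exact ReachI.down hpop h4 h6
      · exact ReachI.right hpop h2 h6
    have hmono : ∀ y x, v y x = true → updA v ny nx y x = true := fun y x h => updA_mono h
    refine ⟨⟨?_, ?_, ?_, hmono _ _ hv00, ?_⟩, fun _ _ _ => by simp [updA]⟩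
    · intro y x hv
      simp only [updA] at hv
      split at hv
      · next hyx => rw [hyx.1, hyx.2]; exact hreach
      · exact hsound _ _ hv
    · intro p hp
      rcases List.mem_cons.mp hp with rfl | hp
      · simp [updA]
      · exact hmono _ _ (hstack p hp)
    · intro y x hv
      simp only [updA] at hv
      split at hv
      · next hyx => exact Or.inl (by rw [hyx.1, hyx.2]; exact List.mem_cons_self ..)
      · rcases hclose y x hv with hmem | hcc | hcl
        · exact Or.inl (List.mem_cons_of_mem _ hmem)
        · exact Or.inr (Or.inl hcc)
        · exact Or.inr (Or.inr (closedAt_mono hmono hcl))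
    · intro hv
      simp only [updA] at hv
      split at hv
      · next hyx => exact List.mem_cons.mpr (Or.inl (by rw [Prod.mk.injEq]; omega))
      · exact List.mem_cons_of_mem _ (hgs hv)

theorem loopA_iff {board : List (List Int)} {n m : Int} (hn : 1 ≤ n) (hm : 1 ≤ m) :
    ∀ (fuel : Nat) (v : Int → Int → Bool) (s : List (Int × Int)),
      InvA board n m v s → s.length + unv n m v ≤ fuel →
      (loopA board n m fuel v s = true ↔ ReachI board n m (m - 1) (n - 1)) := by
  intro fuel
  induction fuel with
  | zero =>
      intro v s hInv hmeas
      have hs : s = [] := List.length_eq_zero_iff.mp (by omega)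
      subst hs
      simp only [loopA]
      refine ⟨fun h => absurd h (by decide), fun hr => ?_⟩
      have hv := complete_of_empty hInv _ _ hr
      simpa using hInv.2.2.2.2 hv
  | succ fuel ih =>
      intro v s hInv hmeas
      match s with
      | [] =>
          simp only [loopA]
          refine ⟨fun h => absurd h (by decide), fun hr => ?_⟩
          have hv := complete_of_empty hInv _ _ hr
          simpa using hInv.2.2.2.2 hv
      | (cx, cy) :: rest =>
          obtain ⟨hsound, hstack, hclose, hv00, hgs⟩ := hInv
          have hvcc : v cy cx = true := hstack (cx, cy) (List.mem_cons_self ..)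
          have hpop : ReachI board n m cy cx := hsound _ _ hvcc
          have hb := reach_bounds hn hm hpop
          simp only [loopA]
          by_cases hgoal : cx = n - 1 ∧ cy = m - 1
          · rw [if_pos hgoal]
            simp only [true_iff]
            rw [← hgoal.1, ← hgoal.2]
            exact hpop
          · rw [if_neg hgoal]
            have hMid : MidInv board n m cx cy v rest := by
              refine ⟨hsound, fun p hp => hstack p (List.mem_cons_of_mem _ hp), ?_, hv00, ?_⟩
              · intro y x hv
                rcases hclose y x hv with hmem | hcl
                · rcases List.mem_cons.mp hmem with hh | ht
                  · exact Or.inr (Or.inl hh)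
                  · exact Or.inl ht
                · exact Or.inr (Or.inr hcl)
              · intro hv
                rcases List.mem_cons.mp (hgs hv) with hh | ht
                · exfalso; apply hgoal
                  rw [Prod.mk.injEq] at hh
                  omega
                · exact ht
            obtain ⟨hMid1, hhand1⟩ :=
              stepA_mid hn hm hpop (Or.inl ⟨rfl, rfl⟩) hgoal hMid
            obtain ⟨hMid2, hhand2⟩ :=
              stepA_mid (v := (stepA board n m (v, rest) cx (cy + 1)).1)
                (s := (stepA board n m (v, rest) cx (cy + 1)).2)
                hn hm hpop (Or.inr ⟨rfl, rfl⟩) hgoal (by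
                  simpa using hMid1)
            obtain ⟨h2sound, h2stack, h2close, h2v00, h2gs⟩ := by simpa using hMid2
            have hmono2 : ∀ y x, (stepA board n m (v, rest) cx (cy + 1)).1 y x = true →
                (stepA board n m (stepA board n m (v, rest) cx (cy + 1)) (cx + 1) cy).1 y x
                  = true := fun y x h => stepA_mono h
            have hclosed_cc : closedAt board n m
                (stepA board n m (stepA board n m (v, rest) cx (cy + 1)) (cx + 1) cy).1 cy cx := by
              constructor
              · intro h1 h2
                exact hmono2 _ _ (hhand1 (by omega) h1 h2)
              · intro h1 h2
                exact hhand2 h1 (by omega) h2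
            have hInv2 : InvA board n m
                (stepA board n m (stepA board n m (v, rest) cx (cy + 1)) (cx + 1) cy).1
                (stepA board n m (stepA board n m (v, rest) cx (cy + 1)) (cx + 1) cy).2 := by
              refine ⟨h2sound, h2stack, ?_, h2v00, h2gs⟩
              intro y x hv
              rcases h2close y x hv with hmem | hcc | hcl
              · exact Or.inl hmem
              · rw [Prod.mk.injEq] at hcc
                right
                rw [hcc.2, hcc.1]
                exact hclosed_cc
              · exact Or.inr hcl
            apply ih _ _ hInv2
            have m1 := stepA_measure (board := board) (n := n) (m := m)
              (stepA board n m (v, rest) cx (cy + 1)) (cx + 1) cy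
            have m2 := stepA_measure (board := board) (n := n) (m := m) (v, rest) cx (cy + 1)
            simp only at m2
            simp only [List.length_cons] at hmeas
            omega

theorem solve_eq_reach {board : List (List Int)} {n m : Int}
    (hp : Pre_solve board n m) :
    (solve board n m = "Yes" ↔ ReachI board n m (m - 1) (n - 1)) := by
  obtain ⟨hn, hm, -⟩ := hp
  have hv0 : ∀ y x, updA (fun _ _ => false) 0 0 y x = true ↔ (y = 0 ∧ x = 0) := by
    intro y x
    simp only [updA]
    split
    · next h => simp [h]
    · next h => simp [h]
  have hInv0 : InvA board n m (updA (fun _ _ => false) 0 0) [(0, 0)] := by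
    refine ⟨?_, ?_, ?_, ?_, ?_⟩
    · intro y x hv
      obtain ⟨rfl, rfl⟩ := (hv0 y x).mp hv
      exact ReachI.start
    · intro p hp
      rcases List.mem_singleton.mp hp with rfl
      exact (hv0 0 0).mpr ⟨rfl, rfl⟩
    · intro y x hv
      obtain ⟨rfl, rfl⟩ := (hv0 y x).mp hv
      exact Or.inl (List.mem_singleton.mpr rfl)
    · exact (hv0 0 0).mpr ⟨rfl, rfl⟩
    · intro hv
      have := (hv0 _ _).mp hv
      exact List.mem_singleton.mpr (by rw [Prod.mk.injEq]; omega)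
  have hfilter : (Finset.Ico (0 : Int) m ×ˢ Finset.Ico (0 : Int) n).filter
        (fun p => updA (fun _ _ => false) 0 0 p.1 p.2 = false) =
      (Finset.Ico (0 : Int) m ×ˢ Finset.Ico (0 : Int) n).erase (0, 0) := by
    ext p
    simp only [Finset.mem_filter, Finset.mem_erase]
    constructor
    · rintro ⟨hp, hfalse⟩
      refine ⟨?_, hp⟩
      intro hp0
      rw [hp0] at hfalse
      simp [updA] at hfalse
    · rintro ⟨hne, hp⟩
      refine ⟨hp, ?_⟩
      simp only [updA]
      rw [if_neg]
      intro h
      exact hne (Prod.ext (by omega) (by omega))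
  have hmem00 : ((0 : Int), (0 : Int)) ∈ Finset.Ico (0 : Int) m ×ˢ Finset.Ico (0 : Int) n := by
    simp [Finset.mem_product, Finset.mem_Ico]
    omega
  have hcard : (Finset.Ico (0 : Int) m ×ˢ Finset.Ico (0 : Int) n).card =
      m.toNat * n.toNat := by
    rw [Finset.card_product, Int.card_Ico, Int.card_Ico]
    simp
  have hunv : unv n m (updA (fun _ _ => false) 0 0) = m.toNat * n.toNat - 1 := by
    unfold unv
    rw [hfilter, Finset.card_erase_of_mem hmem00, hcard]
  have hpos : 1 ≤ m.toNat * n.toNat :=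
    Nat.one_le_iff_ne_zero.mpr (Nat.mul_ne_zero (by omega) (by omega))
  have hcomm : m.toNat * n.toNat = n.toNat * m.toNat := Nat.mul_comm _ _
  have hiff := loopA_iff hn hm (n.toNat * m.toNat) (updA (fun _ _ => false) 0 0) [(0, 0)]
    hInv0 (by simp only [List.length_singleton]; omega)
  unfold solve
  split
  · next ht => simp only [true_iff]; exact hiff.mp ht
  · next ht =>
      constructor
      · intro hcontra; exact absurd hcontra (by decide)
      · intro hr; exact absurd (hiff.mpr hr) ht

-- ---------- B side ----------

theorem cellB_cast {board : List (List Int)} {i j : Nat} :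
    cellA board (i : Int) (j : Int) = cellB board i j := by
  simp [cellA, cellB]

-- inversion on a ReachI derivation
theorem reach_inv {board : List (List Int)} {n m : Int} {y x : Int}
    (h : ReachI board n m y x) :
    (y = 0 ∧ x = 0) ∨
    (∃ y', y = y' + 1 ∧ ReachI board n m y' x ∧ y < m ∧ cellA board y x = 1) ∨
    (∃ x', x = x' + 1 ∧ ReachI board n m y x' ∧ x < n ∧ cellA board y x = 1) := by
  cases h with
  | start => exact Or.inl ⟨rfl, rfl⟩
  | @down y' x' h1 h2 h3 => exact Or.inr (Or.inl ⟨y', rfl, h1, h2, h3⟩)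
  | @right y' x' h1 h2 h3 => exact Or.inr (Or.inr ⟨x', rfl, h1, h2, h3⟩)

-- the DP recurrence characterises ReachI at non-origin cells
theorem reach_rec {board : List (List Int)} {n m : Int} (hn : 1 ≤ n) (hm : 1 ≤ m)
    {i j : Nat} (hij : ¬(i = 0 ∧ j = 0)) (hi : i < m.toNat) (hj : j < n.toNat) :
    (ReachI board n m (i : Int) (j : Int) ↔
      cellB board i j = 1 ∧
        ((0 < i ∧ ReachI board n m ((i - 1 : Nat) : Int) (j : Int)) ∨
         (0 < j ∧ ReachI board n m (i : Int) ((j - 1 : Nat) : Int)))) := by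
  constructor
  · intro h
    rcases reach_inv h with ⟨h0, h0'⟩ | ⟨y, rfl', h1, h2, h3⟩ | ⟨x, rfl', h1, h2, h3⟩
    · exfalso; exact hij ⟨by omega, by omega⟩
    · have hb := reach_bounds hn hm h1
      have hi0 : 0 < i := by omega
      have hy : ((i - 1 : Nat) : Int) = y := by omega
      refine ⟨by rw [← cellB_cast]; exact h3, Or.inl ⟨hi0, by rw [hy]; exact h1⟩⟩
    · have hb := reach_bounds hn hm h1
      have hj0 : 0 < j := by omega
      have hx : ((j - 1 : Nat) : Int) = x := by omega
      refine ⟨by rw [← cellB_cast]; exact h3, Or.inr ⟨hj0, by rw [hx]; exact h1⟩⟩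
  · rintro ⟨hc, h | h⟩
    · obtain ⟨hi0, h1⟩ := h
      have : ((i : Nat) : Int) = ((i - 1 : Nat) : Int) + 1 := by omega
      rw [this]
      exact ReachI.down h1 (by omega) (by rw [← this, cellB_cast]; exact hc)
    · obtain ⟨hj0, h1⟩ := h
      have : ((j : Nat) : Int) = ((j - 1 : Nat) : Int) + 1 := by omega
      rw [this]
      exact ReachI.right h1 (by omega) (by rw [← this, cellB_cast]; exact hc)

-- the table keeps m.toNat rows of n.toNat entries throughout
def ShapeOk (n m : Int) (t : List (List Bool)) : Prop :=
  t.length = m.toNat ∧ ∀ row ∈ t, row.length = n.toNat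

theorem row_len {n m : Int} {t : List (List Bool)} (h : ShapeOk n m t) {i : Nat}
    (hi : i < m.toNat) : (t.getD i []).length = n.toNat := by
  obtain ⟨h1, h2⟩ := h
  have hlt : i < t.length := by omega
  rw [List.getD_eq_getElem?_getD, List.getElem?_eq_getElem hlt]
  exact h2 _ (List.getElem_mem hlt)

theorem shape_setT {n m : Int} {t : List (List Bool)} (h : ShapeOk n m t) {i : Nat}
    (hi : i < m.toNat) (j : Nat) (v : Bool) : ShapeOk n m (setT t i j v) := by
  obtain ⟨h1, h2⟩ := h
  refine ⟨by simp [setT, h1], ?_⟩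
  intro row hrow
  rcases List.mem_or_eq_of_mem_set hrow with hmem | heq
  · exact h2 _ hmem
  · rw [heq, List.length_set]
    exact row_len ⟨h1, h2⟩ hi

theorem getT_setT {n m : Int} {t : List (List Bool)} (h : ShapeOk n m t) {i j : Nat}
    (hi : i < m.toNat) (hj : j < n.toNat) (v : Bool) (i' j' : Nat) :
    getT (setT t i j v) i' j' = if i' = i ∧ j' = j then v else getT t i' j' := by
  have hlen : i < t.length := by have := h.1; omega
  have hrl : (t.getD i []).length = n.toNat := row_len h hi
  rw [List.getD_eq_getElem?_getD] at hrl
  unfold getT setT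
  simp only [List.getD_eq_getElem?_getD]
  by_cases hii : i' = i
  · subst hii
    rw [List.getElem?_set_self hlen, Option.getD_some]
    by_cases hjj : j' = j
    · subst hjj
      rw [List.getElem?_set_self (by omega), Option.getD_some, if_pos ⟨rfl, rfl⟩]
    · rw [List.getElem?_set_ne (by omega), if_neg (by simp [hjj])]
  · rw [List.getElem?_set_ne (by omega), if_neg (by simp [hii])]

theorem getT_init (n m : Int) (i j : Nat) :
    getT (List.replicate m.toNat (List.replicate n.toNat false)) i j = false := by
  unfold getT
  simp only [List.getD_eq_getElem?_getD]
  by_cases hi : i < m.toNat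
  · rw [List.getElem?_replicate, if_pos hi, Option.getD_some]
    by_cases hj : j < n.toNat
    · rw [List.getElem?_replicate, if_pos hj, Option.getD_some]
    · rw [List.getElem?_replicate, if_neg hj, Option.getD_none]
  · rw [List.getElem?_replicate, if_neg hi, Option.getD_none]
    simp

-- processed-region invariants for the double fold
def TOk (board : List (List Int)) (n m : Int) (t : List (List Bool)) (I J : Nat) : Prop :=
  ShapeOk n m t ∧
  (∀ i j, ((i < I ∧ j < n.toNat) ∨ (i = I ∧ j < J)) →
    (getT t i j = true ↔ ReachI board n m (i : Int) (j : Int))) ∧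
  (∀ i j, ¬((i < I ∧ j < n.toNat) ∨ (i = I ∧ j < J)) → getT t i j = false)

theorem stepB_tok {board : List (List Int)} {n m : Int} (hn : 1 ≤ n) (hm : 1 ≤ m)
    {t : List (List Bool)} {I J : Nat} (hI : I < m.toNat) (hJ : J < n.toNat)
    (h : TOk board n m t I J) : TOk board n m (stepB board t I J) I (J + 1) := by
  obtain ⟨hsh, hok, hfalse⟩ := h
  unfold stepB
  split
  · -- I = 0 ∧ J = 0
    next h00 =>
    obtain ⟨hI0, hJ0⟩ := h00
    subst hI0; subst hJ0
    refine ⟨shape_setT hsh hI 0 true, ?_, ?_⟩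
    · intro i j hij
      have : i = 0 ∧ j = 0 := by omega
      obtain ⟨rfl, rfl⟩ := this
      rw [getT_setT hsh hI hJ]
      simp only [and_self, ite_true, true_iff]
      exact ReachI.start
    · intro i j hij
      have hne : ¬(i = 0 ∧ j = 0) := by omega
      rw [getT_setT hsh hI hJ, if_neg hne]
      exact hfalse i j (by omega)
  · next h00 =>
    split
    · -- board cell is 1
      next hc =>
      refine ⟨shape_setT hsh hI J _, ?_, ?_⟩
      · intro i j hij
        rw [getT_setT hsh hI hJ]
        by_cases he : i = I ∧ j = J
        · obtain ⟨rfl, rfl⟩ := he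
          rw [if_pos ⟨rfl, rfl⟩, reach_rec hn hm h00 hI hJ]
          constructor
          · intro hval
            refine ⟨hc, ?_⟩
            rcases Bool.or_eq_true_iff.mp hval with hu | hl
            · split at hu
              · next hi0 => exact Or.inl ⟨hi0, (hok (i - 1) j (Or.inl ⟨by omega, hJ⟩)).mp hu⟩
              · simp at hu
            · split at hl
              · next hj0 => exact Or.inr ⟨hj0, (hok i (j - 1) (Or.inr ⟨rfl, by omega⟩)).mp hl⟩
              · simp at hl
          · rintro ⟨-, hu | hl⟩
            · obtain ⟨hi0, hr⟩ := hu
              have := (hok (i - 1) j (Or.inl ⟨by omega, hJ⟩)).mpr hr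
              simp [if_pos hi0, this]
            · obtain ⟨hj0, hr⟩ := hl
              have := (hok i (j - 1) (Or.inr ⟨rfl, by omega⟩)).mpr hr
              simp [if_pos hj0, this]
        · rw [if_neg he]
          exact hok i j (by omega)
      · intro i j hij
        have hne : ¬(i = I ∧ j = J) := by omega
        rw [getT_setT hsh hI hJ, if_neg hne]
        exact hfalse i j (by omega)
    · -- board cell is not 1
      next hc =>
      refine ⟨hsh, ?_, ?_⟩
      · intro i j hij
        by_cases he : i = I ∧ j = J
        · obtain ⟨rfl, rfl⟩ := he
          rw [hfalse i j (by omega), reach_rec hn hm h00 hI hJ]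
          simp [hc]
        · exact hok i j (by omega)
      · intro i j hij
        exact hfalse i j (by omega)

theorem innerB_tok {board : List (List Int)} {n m : Int} (hn : 1 ≤ n) (hm : 1 ≤ m)
    {I : Nat} (hI : I < m.toNat) :
    ∀ (J : Nat), J ≤ n.toNat → ∀ (t : List (List Bool)), TOk board n m t I 0 →
      TOk board n m ((List.range J).foldl (fun t j => stepB board t I j) t) I J := by
  intro J
  induction J with
  | zero => intro _ t h; simpa using h
  | succ J ih =>
      intro hJ t h
      rw [List.range_succ, List.foldl_append]
      exact stepB_tok hn hm hI (by omega) (ih (by omega) t h)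

theorem tok_next_row {board : List (List Int)} {n m : Int} {t : List (List Bool)} {I : Nat}
    (h : TOk board n m t I n.toNat) : TOk board n m t (I + 1) 0 := by
  obtain ⟨hsh, hok, hfalse⟩ := h
  exact ⟨hsh, fun i j hij => hok i j (by omega), fun i j hij => hfalse i j (by omega)⟩

theorem outerB_tok {board : List (List Int)} {n m : Int} (hn : 1 ≤ n) (hm : 1 ≤ m) :
    ∀ (I : Nat), I ≤ m.toNat →
      TOk board n m
        ((List.range I).foldl
          (fun t i => (List.range n.toNat).foldl (fun t j => stepB board t i j) t)
          (List.replicate m.toNat (List.replicate n.toNat false))) I 0 := by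
  intro I
  induction I with
  | zero =>
      intro _
      unfold TOk
      refine ⟨⟨by simp, ?_⟩, fun i j hij => absurd hij (by omega), fun i j _ => getT_init n m i j⟩
      intro row hrow
      rw [List.eq_of_mem_replicate hrow]
      simp
  | succ I ih =>
      intro hI
      rw [List.range_succ, List.foldl_append]
      simp only [List.foldl_cons, List.foldl_nil]
      exact tok_next_row (innerB_tok hn hm (by omega) n.toNat le_rfl _ (ih (by omega)))

theorem tableB_spec {board : List (List Int)} {n m : Int} (hn : 1 ≤ n) (hm : 1 ≤ m) :
    TOk board n m (tableB board n m) m.toNat 0 := by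
  unfold tableB
  exact outerB_tok hn hm m.toNat le_rfl

theorem solve_alt_eq_reach {board : List (List Int)} {n m : Int}
    (hp : Pre_solve board n m) :
    (solve_alt board n m = "Yes" ↔ ReachI board n m (m - 1) (n - 1)) := by
  obtain ⟨hn, hm, -⟩ := hp
  have hN : 1 ≤ n.toNat := by omega
  have hM : 1 ≤ m.toNat := by omega
  have h := (tableB_spec (board := board) hn hm).2.1 (m.toNat - 1) (n.toNat - 1)
    (Or.inl ⟨by omega, by omega⟩)
  have hcm : ((m.toNat - 1 : Nat) : Int) = m - 1 := by omega
  have hcn : ((n.toNat - 1 : Nat) : Int) = n - 1 := by omega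
  rw [hcm, hcn] at h
  unfold solve_alt
  split
  · next ht => simp only [true_iff]; exact h.mp ht
  · next ht =>
      constructor
      · intro hcontra; exact absurd hcontra (by decide)
      · intro hr; exact absurd (h.mpr hr) ht

-- ===== VERDICT (by name: the statement is the Claim_ definition above) =====
theorem solve_spec : Claim_equal_solve := by
  intro board n m _ hp
  unfold Spec_solve
  have h1 := solve_eq_reach hp
  have h2 := solve_alt_eq_reach hp
  unfold solve at h1 ⊢
  unfold solve_alt at h2 ⊢
  split at h1 <;> split at h2 <;> simp_all
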